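-- pv_equiv track=rewrite | github.com/SVCE-ACM/A-December-Of_Algorithms-2024 | Solutions/python3_the-ai-developer_Smart-Ticketing-System.py | TktCounter
-- ===== SOURCE A (Python) =====
-- from collections import deque
--
-- def TktCounter(N, requests):
--     vip_queue = deque()
--     regular_queue = deque()
--     result = []
--
--     for request in requests:
--         parts = request.split()
--         name = parts[0]
--         tickets_requested = int(parts[1])
--         is_vip = "VIP" in parts
--         if is_vip:
--             vip_queue.append((name, tickets_requested))
--         else:
--             regular_queue.append((name, tickets_requested))
--
--     while N > 0 and (vip_queue or regular_queue):
--         if vip_queue: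
--             customer, tickets_requested = vip_queue.popleft()
--         else:
--             customer, tickets_requested = regular_queue.popleft()
--
--         if tickets_requested <= N:
--             result.append(f"{customer} purchased {tickets_requested} tickets")
--             N -= tickets_requested
--         else:
--             result.append(f"{customer} purchased {N} tickets")
--             N = 0
--
--     for queue in [vip_queue, regular_queue]:
--         while queue:
--             customer, _ = queue.popleft()
--             result.append(f"{customer} was not served")
--
--     return result
-- ===== SOURCE B (Python) =====
-- def TktCounter(N, requests):
--     parsed = []
--     for r in requests:
--         parts = r.split()
--         parsed.append((parts[0], int(parts[1]), "VIP" in parts))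
--     order = [p for p in parsed if p[2]] + [p for p in parsed if not p[2]]
--     prefix = [0]
--     for _, t, _ in order:
--         prefix.append(prefix[-1] + t)
--     k = next((i for i in range(len(order)) if prefix[i] >= N), len(order))
--     return ([f"{name} purchased {min(t, N - before)} tickets"
--              for (name, t, _), before in zip(order[:k], prefix)]
--             + [f"{name} was not served" for name, _, _ in order[k:]])
-- ===== Notes on version B (the rewrite author's own statement) =====
-- stated objective: alternative
-- what changed: Replaces the stateful queue simulation (two deques, a serve while-loop mutating the remaining count, two drain loops) by a closed-form computation: prefix sums over the VIP-first stable order, a cutoff index k = first position whose prefix sum reaches N, purchase lines min(t, N - prefix[i]) before k and 'was not served' lines after k.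
import Mathlib
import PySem

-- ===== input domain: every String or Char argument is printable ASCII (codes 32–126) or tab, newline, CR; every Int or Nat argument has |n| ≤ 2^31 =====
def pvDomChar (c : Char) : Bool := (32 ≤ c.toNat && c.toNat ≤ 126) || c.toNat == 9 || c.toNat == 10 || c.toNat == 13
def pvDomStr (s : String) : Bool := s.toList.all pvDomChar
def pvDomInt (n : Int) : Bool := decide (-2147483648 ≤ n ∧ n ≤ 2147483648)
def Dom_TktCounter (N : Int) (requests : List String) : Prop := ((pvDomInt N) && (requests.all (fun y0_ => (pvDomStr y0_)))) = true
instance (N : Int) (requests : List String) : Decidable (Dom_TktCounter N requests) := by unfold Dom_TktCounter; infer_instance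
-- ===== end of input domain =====

-- B replaces A's queue simulation (serve loop mutating N + drain loops) by prefix
-- sums of the VIP-first order, a cutoff index and closed-form purchase amounts
-- (objective: alternative algorithm, same cost).

-- shared output formatting (identical f-strings in both Pythons)
def pvLineP (name : String) (t : Int) : String :=
  name ++ " purchased " ++ PySem.Int.toStr t ++ " tickets"
def pvLineU (name : String) : String := name ++ " was not served"

-- ===== PORT A =====
-- first for-loop of A: split each request into the VIP / regular queue
def pvStepA (q : List (String × Int) × List (String × Int)) (r : String) :
    List (String × Int) × List (String × Int) :=
  let parts := PySem.Str.split₀ r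
  let name := parts.getD 0 ""
  let t := (PySem.Int.ofStr? (parts.getD 1 "")).getD 0   -- total stand-in; Pre_ guarantees some
  if parts.contains "VIP" then (q.1 ++ [(name, t)], q.2)
  else (q.1, q.2 ++ [(name, t)])

def pvQueuesA (requests : List String) :
    List (String × Int) × List (String × Int) :=
  requests.foldl pvStepA ([], [])

-- A's while-loop: serve while N > 0, returning (result, leftover vip, leftover regular)
def pvServeA (N : Int) (vip reg : List (String × Int)) (res : List String) :
    List String × List (String × Int) × List (String × Int) :=
  if N > 0 then
    match vip with
    | (c, t) :: vs =>
        if t ≤ N then pvServeA (N - t) vs reg (res ++ [pvLineP c t])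
        else pvServeA 0 vs reg (res ++ [pvLineP c N])
    | [] =>
        match reg with
        | (c, t) :: rs =>
            if t ≤ N then pvServeA (N - t) [] rs (res ++ [pvLineP c t])
            else pvServeA 0 [] rs (res ++ [pvLineP c N])
        | [] => (res, [], [])
  else (res, vip, reg)
termination_by vip.length + reg.length

def TktCounter (N : Int) (requests : List String) : List String :=
  let q := pvQueuesA requests
  let s := pvServeA N q.1 q.2 []
  s.1 ++ s.2.1.map (fun c => pvLineU c.1) ++ s.2.2.map (fun c => pvLineU c.1)

-- ===== PORT B =====
def pvParseB (r : String) : String × Int × Bool :=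
  let parts := PySem.Str.split₀ r
  (parts.getD 0 "", (PySem.Int.ofStr? (parts.getD 1 "")).getD 0, parts.contains "VIP")

-- B's prefix-sum loop: prefix = [0]; for t: prefix.append(prefix[-1] + t)
def pvPrefixB (order : List (String × Int × Bool)) : List Int :=
  order.foldl (fun p e => p ++ [(p.getLast?.getD 0) + e.2.1]) [0]

def TktCounter_alt (N : Int) (requests : List String) : List String :=
  let parsed := requests.map pvParseB
  let order := parsed.filter (fun e => e.2.2) ++ parsed.filter (fun e => !e.2.2)
  let pref := pvPrefixB order
  let k := (pref.take order.length).findIdx (fun p => N ≤ p)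
  (List.zipWith (fun e before => pvLineP e.1 (min e.2.1 (N - before)))
      (order.take k) pref)
    ++ (order.drop k).map (fun e => pvLineU e.1)

-- ===== PRECONDITION & SPEC =====
-- Pre_ excludes exactly the requests on which Python A raises: a request whose
-- split has fewer than two parts (IndexError) or whose second part is not an
-- int literal (ValueError).
def Pre_TktCounter (N : Int) (requests : List String) : Prop :=
  ∀ r ∈ requests, 2 ≤ (PySem.Str.split₀ r).length ∧
    (PySem.Int.ofStr? ((PySem.Str.split₀ r).getD 1 "")).isSome = true
instance (N : Int) (requests : List String) : Decidable (Pre_TktCounter N requests) := by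
  unfold Pre_TktCounter; infer_instance

def pvWitness_TktCounter : Int × List String := (5, ["Alice 3 VIP", "Bob 4"])

def Spec_TktCounter (N : Int) (requests : List String) (out : List String) : Prop := out = TktCounter_alt N requests
instance (N : Int) (requests : List String) (out : List String) : Decidable (Spec_TktCounter N requests out) := by unfold Spec_TktCounter; infer_instance

-- ===== CLAIM (what is proved, stated in full; the proofs are below) =====
def Claim_equal_TktCounter : Prop := ∀ (N : Int) (requests : List String), Dom_TktCounter N requests → Pre_TktCounter N requests → Spec_TktCounter N requests (TktCounter N requests)

-- ===== LEMMAS AND PROOFS =====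

def pvToE (e : String × Int × Bool) : String × Int := (e.1, e.2.1)

-- proof-side: A's serve + drain phases fused into a single pass over one list
def pvPassB (N : Int) (order : List (String × Int × Bool)) (res : List String) :
    List String :=
  match order with
  | [] => res
  | (name, t, _) :: rest =>
      if N > 0 then
        if t ≤ N then pvPassB (N - t) rest (res ++ [pvLineP name t])
        else pvPassB 0 rest (res ++ [pvLineP name N])
      else pvPassB N rest (res ++ [pvLineU name])

-- proof-side: recursive form of B's closed-form output
def pvOutRec (N : Int) : List (String × Int × Bool) → List String
  | [] => []
  | (n, t, _) :: rest =>
      if N > 0 then pvLineP n (min t N) :: pvOutRec (N - t) rest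
      else pvLineU n :: pvOutRec N rest

-- A's parse loop produces exactly B's two stable filters of the parsed entries
theorem pvQueuesA_eq (requests : List String) :
    ∀ v r, requests.foldl pvStepA (v, r)
    = (v ++ ((requests.map pvParseB).filter (fun e => e.2.2)).map pvToE,
       r ++ ((requests.map pvParseB).filter (fun e => !e.2.2)).map pvToE) := by
  induction requests with
  | nil => simp
  | cons s rest ih =>
      intro v r
      rw [List.foldl_cons]
      by_cases h : "VIP" ∈ PySem.Str.split₀ s
      · have hs : pvStepA (v, r) s =
            (v ++ [((PySem.Str.split₀ s).getD 0 "",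
              (PySem.Int.ofStr? ((PySem.Str.split₀ s).getD 1 "")).getD 0)], r) := by
          simp [pvStepA, h]
        rw [hs, ih]
        simp [pvParseB, pvToE, h]
      · have hs : pvStepA (v, r) s =
            (v, r ++ [((PySem.Str.split₀ s).getD 0 "",
              (PySem.Int.ofStr? ((PySem.Str.split₀ s).getD 1 "")).getD 0)]) := by
          simp [pvStepA, h]
        rw [hs, ih]
        simp [pvParseB, pvToE, h]

-- once N ≤ 0, the fused pass only emits 'was not served' lines
theorem pvPassB_drain (l : List (String × Int × Bool)) :
    ∀ N res, ¬ N > 0 →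
      pvPassB N l res = res ++ l.map (fun e => pvLineU e.1) := by
  induction l with
  | nil => intro N res _; simp [pvPassB]
  | cons e rest ih =>
      intro N res h
      obtain ⟨n, t, b⟩ := e
      simp [pvPassB, h, ih N _ h]

-- serving the regular queue alone = the fused pass over its entries
theorem pvServe_reg (regT : List (String × Int × Bool)) :
    ∀ N res,
      (let s := pvServeA N [] (regT.map pvToE) res
       s.1 ++ s.2.1.map (fun c => pvLineU c.1) ++ s.2.2.map (fun c => pvLineU c.1))
      = pvPassB N regT res := by
  induction regT with
  | nil =>
      intro N res
      by_cases h : N > 0 <;> simp [pvServeA, pvPassB, h]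
  | cons e rest ih =>
      intro N res
      obtain ⟨n, t, b⟩ := e
      by_cases h : N > 0
      · by_cases ht : t ≤ N
        · simpa [pvServeA, pvPassB, pvToE, h, ht] using ih (N - t) (res ++ [pvLineP n t])
        · simpa [pvServeA, pvPassB, pvToE, h, ht] using ih 0 (res ++ [pvLineP n N])
      · simp [pvServeA, pvToE, h, pvPassB_drain _ N _ h, List.map_map,
              Function.comp_def]

-- A's serve loop + the two drain loops = the fused pass over vip ++ regular
theorem pvServe_main (vipT : List (String × Int × Bool)) (regT : List (String × Int × Bool)) :
    ∀ N res,
      (let s := pvServeA N (vipT.map pvToE) (regT.map pvToE) res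
       s.1 ++ s.2.1.map (fun c => pvLineU c.1) ++ s.2.2.map (fun c => pvLineU c.1))
      = pvPassB N (vipT ++ regT) res := by
  induction vipT with
  | nil => intro N res; simpa using pvServe_reg regT N res
  | cons e rest ih =>
      intro N res
      obtain ⟨n, t, b⟩ := e
      by_cases h : N > 0
      · by_cases ht : t ≤ N
        · simpa [pvServeA, pvPassB, pvToE, h, ht] using ih (N - t) (res ++ [pvLineP n t])
        · simpa [pvServeA, pvPassB, pvToE, h, ht] using ih 0 (res ++ [pvLineP n N])
      · simp [pvServeA, pvToE, h,
              pvPassB_drain _ N _ h, List.map_map, Function.comp_def]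

-- once N ≤ 0, the recursive form emits only 'was not served' lines
theorem pvOutRec_nonpos (l : List (String × Int × Bool)) :
    ∀ N, N ≤ 0 → pvOutRec N l = l.map (fun e => pvLineU e.1) := by
  induction l with
  | nil => intro N _; simp [pvOutRec]
  | cons e rest ih =>
      intro N h
      obtain ⟨n, t, b⟩ := e
      have : ¬ N > 0 := by omega
      simp [pvOutRec, this, ih N h]

-- the fused pass = the recursive form of the closed-form output
theorem pvPass_out (l : List (String × Int × Bool)) :
    ∀ N res, pvPassB N l res = res ++ pvOutRec N l := by
  induction l with
  | nil => intro N res; simp [pvPassB, pvOutRec]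
  | cons e rest ih =>
      intro N res
      obtain ⟨n, t, b⟩ := e
      by_cases h : N > 0
      · by_cases ht : t ≤ N
        · have hm : min t N = t := by omega
          simp [pvPassB, pvOutRec, h, ht, ih (N - t) (res ++ [pvLineP n t])]
        · have hm : min t N = N := by omega
          have h0 : (0 : Int) ≤ 0 := le_refl 0
          have hnt : N - t ≤ 0 := by omega
          simp [pvPassB, pvOutRec, h, ht, hm, ih 0 (res ++ [pvLineP n N]),
                pvOutRec_nonpos rest 0 h0, pvOutRec_nonpos rest (N - t) hnt]
      · simp [pvPassB, pvOutRec, h, ih N (res ++ [pvLineU n])]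

-- the hand-written prefix loop is a scanl
theorem pvPrefix_foldl (l : List (String × Int × Bool)) :
    ∀ (p : List Int) (a : Int),
      l.foldl (fun p e => p ++ [(p.getLast?.getD 0) + e.2.1]) (p ++ [a])
      = p ++ List.scanl (fun s e => s + e.2.1) a l := by
  induction l with
  | nil => intro p a; simp
  | cons e rest ih =>
      intro p a
      rw [List.foldl_cons]
      have hlast : ((p ++ [a]).getLast?.getD 0) = a := by simp
      have : (p ++ [a]) ++ [((p ++ [a]).getLast?.getD 0) + e.2.1]
          = (p ++ [a]) ++ [a + e.2.1] := by rw [hlast]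
      rw [this, ih (p ++ [a]) (a + e.2.1)]
      simp [List.scanl]

-- the recursive form equals B's take/zip/drop construction, for any prefix base a
theorem pvOut_form (N : Int) (l : List (String × Int × Bool)) :
    ∀ a : Int,
      pvOutRec (N - a) l
      = (List.zipWith (fun e before => pvLineP e.1 (min e.2.1 (N - before)))
            (l.take ((((List.scanl (fun s e => s + e.2.1) a l).take l.length).findIdx
                (fun p => decide (N ≤ p)))))
            (List.scanl (fun s e => s + e.2.1) a l))
        ++ (l.drop (((List.scanl (fun s e => s + e.2.1) a l).take l.length).findIdx
                (fun p => decide (N ≤ p)))).map (fun e => pvLineU e.1) := by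
  induction l with
  | nil => intro a; simp [pvOutRec]
  | cons e rest ih =>
      intro a
      obtain ⟨n, t, b⟩ := e
      rw [List.scanl_cons]
      by_cases h : N ≤ a
      · have hidx : ((a :: List.scanl (fun s e => s + e.2.1) (a + t) rest).take
            ((n, t, b) :: rest).length).findIdx (fun p => decide (N ≤ p)) = 0 := by
          simp [List.findIdx_cons, h]
        rw [hidx]
        have : N - a ≤ 0 := by omega
        simp [pvOutRec_nonpos _ _ this]
      · have hidx : ((a :: List.scanl (fun s e => s + e.2.1) (a + t) rest).take
            ((n, t, b) :: rest).length).findIdx (fun p => decide (N ≤ p))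
            = (((List.scanl (fun s e => s + e.2.1) (a + t) rest).take rest.length).findIdx
                (fun p => decide (N ≤ p))) + 1 := by
          simp [List.findIdx_cons, h]
        rw [hidx]
        have hpos : N - a > 0 := by omega
        have harith : N - a - t = N - (a + t) := by ring
        simp only [pvOutRec, if_pos hpos, List.take_succ_cons, List.drop_succ_cons,
          List.zipWith_cons_cons, harith, ih (a + t)]
        simp

-- ===== VERDICT (by name: the statement is the Claim_ definition above) =====
theorem TktCounter_spec : Claim_equal_TktCounter := by
  intro N requests _ _
  unfold Spec_TktCounter
  have hA : TktCounter N requests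
      = pvPassB N ((requests.map pvParseB).filter (fun e => e.2.2)
          ++ (requests.map pvParseB).filter (fun e => !e.2.2)) [] := by
    unfold TktCounter pvQueuesA
    rw [pvQueuesA_eq requests [] []]
    simpa using pvServe_main ((requests.map pvParseB).filter (fun e => e.2.2))
      ((requests.map pvParseB).filter (fun e => !e.2.2)) N []
  have hB : TktCounter_alt N requests
      = pvOutRec N ((requests.map pvParseB).filter (fun e => e.2.2)
          ++ (requests.map pvParseB).filter (fun e => !e.2.2)) := by
    unfold TktCounter_alt pvPrefixB
    have hpf := pvPrefix_foldl ((requests.map pvParseB).filter (fun e => e.2.2)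
        ++ (requests.map pvParseB).filter (fun e => !e.2.2)) [] 0
    simp only [List.nil_append] at hpf
    have hform := pvOut_form N ((requests.map pvParseB).filter (fun e => e.2.2)
        ++ (requests.map pvParseB).filter (fun e => !e.2.2)) 0
    simp only [sub_zero] at hform
    simp only [hpf]
    exact hform.symm
  rw [hA, hB, pvPass_out _ N []]
  simp
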